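-- pv_equiv track=rewrite | github.com/gaigutherz/Akkademia | akkadian/translate_from_transliteration.py | fix_numbers
-- ===== SOURCE A (Python) =====
-- import string
--
-- number_substitutions = {
--     "0": "₀", "1": "₁", "2": "₂", "3": "₃", "4": "₄", "5": "₅", "6": "₆", "7": "₇", "8": "₈", "9": "₉"
-- }
--
-- def fix_numbers(line):
--     new_line = ""
--
--     prev_l = ""
--     for l in line:
--         if prev_l and prev_l in string.ascii_letters and l in number_substitutions:
--             new_line += number_substitutions[l]
--         else:
--             new_line += l
--         prev_l = l
--
--     return new_line
-- ===== SOURCE B (Python) =====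
-- import re
--
-- number_substitutions = {
--     "0": "\u2080", "1": "\u2081", "2": "\u2082", "3": "\u2083", "4": "\u2084",
--     "5": "\u2085", "6": "\u2086", "7": "\u2087", "8": "\u2088", "9": "\u2089"
-- }
--
-- def fix_numbers(line):
--     # one regex substitution: a digit preceded (zero-width lookbehind) by an
--     # ASCII letter becomes its subscript; the lookbehind inspects the ORIGINAL
--     # preceding character, so of consecutive digits only the first is converted.
--     return re.sub(r'(?<=[a-zA-Z])[0-9]',
--                   lambda m: number_substitutions[m.group()], line)
-- ===== Notes on version B (the rewrite author's own statement) =====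
-- stated objective: idiomatic
-- what changed: Replaces the manual prev-char loop with string accumulator by a single re.sub whose zero-width lookbehind requires an ASCII letter before the digit: the regex engine drives the scan and no explicit loop or state is maintained.
import Mathlib
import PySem

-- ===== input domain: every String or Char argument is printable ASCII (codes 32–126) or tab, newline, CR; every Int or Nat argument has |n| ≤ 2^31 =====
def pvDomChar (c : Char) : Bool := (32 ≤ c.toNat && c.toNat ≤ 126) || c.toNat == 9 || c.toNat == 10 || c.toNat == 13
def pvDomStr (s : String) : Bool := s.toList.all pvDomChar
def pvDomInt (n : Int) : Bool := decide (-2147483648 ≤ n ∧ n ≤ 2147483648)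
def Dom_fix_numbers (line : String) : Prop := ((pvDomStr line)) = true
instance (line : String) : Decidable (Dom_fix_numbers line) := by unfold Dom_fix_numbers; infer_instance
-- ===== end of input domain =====

-- B replaces A's explicit prev-char/accumulator loop by one re.sub with a zero-width
-- lookbehind (objective: more idiomatic; same O(n) cost; a timing run measured B faster by a constant factor).

-- shared module constant: the number_substitutions dict (single-char keys/values)
def numberSubstitutions : List (Char × Char) :=
  [('0', '₀'), ('1', '₁'), ('2', '₂'), ('3', '₃'), ('4', '₄'),
   ('5', '₅'), ('6', '₆'), ('7', '₇'), ('8', '₈'), ('9', '₉')]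

-- string.ascii_letters
def asciiLetters : List Char := "abcdefghijklmnopqrstuvwxyzABCDEFGHIJKLMNOPQRSTUVWXYZ".toList

-- ===== PORT A =====
-- one loop iteration: state is (new_line, prev_l); prev_l = none models prev_l == ""
def fixNumbersStep (st : List Char × Option Char) (l : Char) : List Char × Option Char :=
  match st.2 with
  | some p =>
      if asciiLetters.contains p then
        match numberSubstitutions.lookup l with
        | some s => (st.1 ++ [s], some l)   -- l in number_substitutions: append substitution
        | none   => (st.1 ++ [l], some l)
      else (st.1 ++ [l], some l)
  | none => (st.1 ++ [l], some l)

def fix_numbers (line : String) : String :=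
  String.mk (line.toList.foldl fixNumbersStep ([], none)).1

-- ===== PORT B =====
-- Hand port of re.sub with the pattern '(?<=[a-zA-Z])[0-9]' (PySem has no regex):
-- the engine scans positions left to right; at each position the pattern matches iff
-- the character is a digit ([0-9]) and the zero-width lookbehind sees an ASCII letter
-- as the ORIGINAL preceding character; a match (always of length 1) is replaced by the
-- callback's dict lookup, a non-match is copied, and the scan advances one position.
-- This is exact for this pattern: all matches have length 1 and never overlap.
def regexSubScan (prev : Option Char) (cs : List Char) : List Char :=
  match cs with
  | [] => []
  | c :: rest =>
      match numberSubstitutions.lookup c, prev with   -- [0-9] consumed char, lookbehind context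
      | some s, some p =>
          if asciiLetters.contains p then s :: regexSubScan (some c) rest
          else c :: regexSubScan (some c) rest
      | _, _ => c :: regexSubScan (some c) rest

def fix_numbers_alt (line : String) : String :=
  String.mk (regexSubScan none line.toList)

-- ===== PRECONDITION & SPEC =====
def Spec_fix_numbers (line : String) (out : String) : Prop := out = fix_numbers_alt line
instance (line : String) (out : String) : Decidable (Spec_fix_numbers line out) := by unfold Spec_fix_numbers; infer_instance

-- ===== CLAIM (what is proved, stated in full; the proofs are below) =====
def Claim_equal_fix_numbers : Prop := ∀ (line : String), Dom_fix_numbers line → Spec_fix_numbers line (fix_numbers line)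

-- ===== LEMMAS AND PROOFS =====
lemma foldl_eq_scan (cs : List Char) : ∀ (acc : List Char) (prev : Option Char),
    (cs.foldl fixNumbersStep (acc, prev)).1 = acc ++ regexSubScan prev cs := by
  induction cs with
  | nil => simp [regexSubScan]
  | cons c rest ih =>
      intro acc prev
      rcases prev with _ | p <;> rcases h : numberSubstitutions.lookup c with _ | s <;>
        simp only [List.foldl_cons, fixNumbersStep, regexSubScan, h] <;>
        (try split_ifs) <;> simp [ih]

-- ===== VERDICT (by name: the statement is the Claim_ definition above) =====
theorem fix_numbers_spec : Claim_equal_fix_numbers := by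
  intro line _
  show _ = _
  unfold fix_numbers fix_numbers_alt
  rw [foldl_eq_scan]
  simp
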